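-- pv_equiv track=rewrite | github.com/madchan912/SpartaStudy | python_study/08.15_1541.py | min_exp
-- ===== SOURCE A (Python) =====
-- def min_exp(a):
--     # -를 기준으로 뒤의 값이 더 크면 최솟값
--     parts = a.split('-')
--     sums = []
--     for part in parts:
--         # 나눈걸 기준으로 + 해서 합을 구함
--         numbers = list(map(int, part.split('+')))
--         sums.append(sum(numbers))
--
--     # 맨 앞의 값에서 뒤에 -로 나눠논 조합들의 합을 뺌
--     result = sums[0]
--     for s in sums[1:]:
--         result -= s
--
--     return result
-- ===== SOURCE B (Python) =====
-- def min_exp(a):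
--     # one-pass scan: running sign flips to -1 permanently at the first '-'
--     acc = 0
--     sign = 1
--     cur = ''
--     for ch in a:
--         if ch == '+' or ch == '-':
--             acc += sign * int(cur)
--             cur = ''
--             if ch == '-':
--                 sign = -1
--         else:
--             cur += ch
--     return acc + sign * int(cur)
-- ===== Notes on version B (the rewrite author's own statement) =====
-- stated objective: alternative
-- what changed: B replaces A's two-level split ('-' groups, then '+' tokens, summed into a list and folded) by a single left-to-right character scan that accumulates each token and adds it with a running sign that flips permanently at the first '-'.
import Mathlib
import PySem

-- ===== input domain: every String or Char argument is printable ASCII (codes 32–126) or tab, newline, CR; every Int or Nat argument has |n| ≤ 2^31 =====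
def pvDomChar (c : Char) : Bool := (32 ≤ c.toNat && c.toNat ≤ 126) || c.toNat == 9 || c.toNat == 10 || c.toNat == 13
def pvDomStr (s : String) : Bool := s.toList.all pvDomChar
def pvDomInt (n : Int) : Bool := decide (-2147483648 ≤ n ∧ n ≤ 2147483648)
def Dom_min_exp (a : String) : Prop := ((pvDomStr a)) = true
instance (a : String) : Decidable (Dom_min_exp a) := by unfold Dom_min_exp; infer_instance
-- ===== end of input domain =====

-- B changes the decomposition: a single left-to-right character scan with a running sign,
-- instead of A's split-on-'-' / split-on-'+' two-level pass (objective: alternative).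

-- ===== PORT A =====
def min_exp (a : String) : Int :=
  let parts := PySem.Chars.splitOn a.toList ['-']
  let sums := parts.foldl (fun acc part =>
    acc ++ [((PySem.Chars.splitOn part ['+']).map
        (fun t => (PySem.Int.ofChars? t).getD 0)).sum]) []
  let result := (PySem.List.pyGet? sums (0 : Int)).getD 0
  (PySem.List.slice sums (some 1) none).foldl (fun r s => r - s) result

-- ===== PORT B =====
def min_exp_alt (a : String) : Int :=
  let st := a.toList.foldl (fun (s : Int × Int × List Char) ch =>
    if ch = '+' ∨ ch = '-' then
      (s.1 + s.2.1 * (PySem.Int.ofChars? s.2.2).getD 0,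
       (if ch = '-' then (-1 : Int) else s.2.1), [])
    else (s.1, s.2.1, s.2.2 ++ [ch])) (0, 1, [])
  st.1 + st.2.1 * (PySem.Int.ofChars? st.2.2).getD 0

-- ===== PRECONDITION & SPEC =====
-- simple recursive model of s.split(c) for a one-character separator (shared by Pre_ and the proofs)
def sp (c : Char) : List Char → List (List Char)
  | [] => [[]]
  | x :: xs =>
    match sp c xs with
    | [] => [[]]
    | h :: t => if x = c then [] :: h :: t else (x :: h) :: t

-- Pre_ excludes exactly the inputs on which Python A raises ValueError: some '-'/'+'-delimited
-- token does not parse as an int (empty token, stray letters, a sign inside a token, ...).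
def Pre_min_exp (a : String) : Prop :=
  ∀ t ∈ (sp '-' a.toList).flatMap (fun p => sp '+' p),
    (PySem.Int.ofChars? t).isSome = true
instance (a : String) : Decidable (Pre_min_exp a) := by unfold Pre_min_exp; infer_instance

def pvWitness_min_exp : String := "0-0"

def Spec_min_exp (a : String) (out : Int) : Prop := out = min_exp_alt a
instance (a : String) (out : Int) : Decidable (Spec_min_exp a out) := by unfold Spec_min_exp; infer_instance

-- ===== CLAIM (what is proved, stated in full; the proofs are below) =====
def Claim_equal_min_exp : Prop := ∀ (a : String), Dom_min_exp a → Pre_min_exp a → Spec_min_exp a (min_exp a)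

-- ===== LEMMAS AND PROOFS =====

-- int(token) with the 0-default both ports use outside Pre_
def Itok (cs : List Char) : Int := (PySem.Int.ofChars? cs).getD 0

theorem sp_ne_nil (c : Char) (l : List Char) : sp c l ≠ [] := by
  cases l with
  | nil => simp [sp]
  | cons x xs =>
    simp only [sp]
    cases hsp : sp c xs with
    | nil => simp
    | cons h t => simp only [hsp]; split <;> simp

theorem sp_nil (c : Char) : sp c [] = [[]] := rfl

theorem sp_cons_eq (c x : Char) (xs : List Char) :
    sp c (x :: xs) = if x = c then [] :: sp c xs
      else (x :: (sp c xs).head!) :: (sp c xs).tail := by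
  cases hsp : sp c xs with
  | nil => exact absurd hsp (sp_ne_nil c xs)
  | cons h t => simp [sp, hsp]

theorem sp_cons (c : Char) (l : List Char) :
    sp c l = (sp c l).head! :: (sp c l).tail :=
  (List.cons_head!_tail (sp_ne_nil c l)).symm

theorem sp_not_mem {c : Char} {l : List Char} (h : c ∉ l) : sp c l = [l] := by
  induction l with
  | nil => rfl
  | cons x xs ih =>
    simp only [List.mem_cons, not_or] at h
    have hx : ¬ x = c := fun e => h.1 e.symm
    simp [sp_cons_eq, ih h.2, hx]

theorem sp_sep_append {c : Char} {p : List Char} (rest : List Char) (h : c ∉ p) :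
    sp c (p ++ c :: rest) = p :: sp c rest := by
  induction p with
  | nil => simp [sp_nil, sp_cons_eq]
  | cons x xs ih =>
    simp only [List.mem_cons, not_or] at h
    have hx : ¬ x = c := fun e => h.1 e.symm
    simp [sp_cons_eq, ih h.2, hx]

-- sum of every int token of l (buffer cur), both operators treated alike
def nsum : List Char → List Char → Int
  | cur, [] => Itok cur
  | cur, c :: rest =>
    if c = '+' ∨ c = '-' then Itok cur + nsum [] rest else nsum (cur ++ [c]) rest

-- value of the expression read left to right with a running sign
def pval : List Char → List Char → Int
  | cur, [] => Itok cur
  | cur, c :: rest =>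
    if c = '+' then Itok cur + pval [] rest
    else if c = '-' then Itok cur - nsum [] rest
    else pval (cur ++ [c]) rest

def psum (p : List Char) : Int := ((sp '+' p).map Itok).sum

theorem psum_no_plus {p : List Char} (h : '+' ∉ p) : psum p = Itok p := by
  simp [psum, sp_not_mem h]

theorem psum_append_plus {p : List Char} (q : List Char) (h : '+' ∉ p) :
    psum (p ++ '+' :: q) = Itok p + psum q := by
  simp [psum, sp_sep_append q h]

-- the split-on-'-' characterisation of pval and nsum
theorem pval_nsum_sp (l : List Char) : ∀ cur, '+' ∉ cur → '-' ∉ cur →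
    pval cur l = psum (cur ++ (sp '-' l).head!) - (((sp '-' l).tail).map psum).sum
    ∧ nsum cur l = psum (cur ++ (sp '-' l).head!) + (((sp '-' l).tail).map psum).sum := by
  induction l with
  | nil =>
    intro cur h1 h2
    simp [pval, nsum, sp_nil, psum_no_plus h1]
  | cons c rest ih =>
    intro cur h1 h2
    by_cases hp : c = '+'
    · subst hp
      have hh := ih [] (by simp) (by simp)
      simp only [List.nil_append] at hh
      constructor
      · simp [pval, sp_cons_eq, hh.1, psum_append_plus _ h1]; ring
      · simp [nsum, sp_cons_eq, hh.2, psum_append_plus _ h1]; ring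
    · by_cases hm : c = '-'
      · subst hm
        have hh := ih [] (by simp) (by simp)
        simp only [List.nil_append] at hh
        constructor
        · simp [pval, sp_cons_eq, hh.2, psum_no_plus h1]
          rw [sp_cons '-' rest]
          simp
        · simp [nsum, sp_cons_eq, hh.2, psum_no_plus h1]
          rw [sp_cons '-' rest]
          simp
      · have hh := ih (cur ++ [c])
          (by simp only [List.mem_append, List.mem_singleton, not_or]
              exact ⟨h1, fun e => hp e.symm⟩)
          (by simp only [List.mem_append, List.mem_singleton, not_or]
              exact ⟨h2, fun e => hm e.symm⟩)
        constructor
        · simp [pval, sp_cons_eq, hp, hm]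
          simpa [List.append_assoc] using hh.1
        · simp [nsum, sp_cons_eq, hp, hm]
          simpa [List.append_assoc] using hh.2

-- B's fold computes pval / nsum according to the running sign
theorem foldB_spec (l : List Char) : ∀ (acc : Int) (cur : List Char),
    ((l.foldl (fun (s : Int × Int × List Char) ch =>
        if ch = '+' ∨ ch = '-' then
          (s.1 + s.2.1 * (PySem.Int.ofChars? s.2.2).getD 0,
           (if ch = '-' then (-1 : Int) else s.2.1), [])
        else (s.1, s.2.1, s.2.2 ++ [ch])) (acc, 1, cur)).1
      + (l.foldl (fun (s : Int × Int × List Char) ch =>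
        if ch = '+' ∨ ch = '-' then
          (s.1 + s.2.1 * (PySem.Int.ofChars? s.2.2).getD 0,
           (if ch = '-' then (-1 : Int) else s.2.1), [])
        else (s.1, s.2.1, s.2.2 ++ [ch])) (acc, 1, cur)).2.1
        * (PySem.Int.ofChars? (l.foldl (fun (s : Int × Int × List Char) ch =>
        if ch = '+' ∨ ch = '-' then
          (s.1 + s.2.1 * (PySem.Int.ofChars? s.2.2).getD 0,
           (if ch = '-' then (-1 : Int) else s.2.1), [])
        else (s.1, s.2.1, s.2.2 ++ [ch])) (acc, 1, cur)).2.2).getD 0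
      = acc + pval cur l)
    ∧ ((l.foldl (fun (s : Int × Int × List Char) ch =>
        if ch = '+' ∨ ch = '-' then
          (s.1 + s.2.1 * (PySem.Int.ofChars? s.2.2).getD 0,
           (if ch = '-' then (-1 : Int) else s.2.1), [])
        else (s.1, s.2.1, s.2.2 ++ [ch])) (acc, -1, cur)).1
      + (l.foldl (fun (s : Int × Int × List Char) ch =>
        if ch = '+' ∨ ch = '-' then
          (s.1 + s.2.1 * (PySem.Int.ofChars? s.2.2).getD 0,
           (if ch = '-' then (-1 : Int) else s.2.1), [])
        else (s.1, s.2.1, s.2.2 ++ [ch])) (acc, -1, cur)).2.1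
        * (PySem.Int.ofChars? (l.foldl (fun (s : Int × Int × List Char) ch =>
        if ch = '+' ∨ ch = '-' then
          (s.1 + s.2.1 * (PySem.Int.ofChars? s.2.2).getD 0,
           (if ch = '-' then (-1 : Int) else s.2.1), [])
        else (s.1, s.2.1, s.2.2 ++ [ch])) (acc, -1, cur)).2.2).getD 0
      = acc - nsum cur l) := by
  induction l with
  | nil =>
    intro acc cur
    constructor <;> (simp [pval, nsum, Itok]; try ring)
  | cons c rest ih =>
    intro acc cur
    by_cases hp : c = '+'
    · subst hp
      constructor
      · simp only [List.foldl_cons, Char.reduceEq, true_or, or_true, false_or, or_false,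
          if_true, if_false]
        rw [(ih _ []).1]; simp [pval, Itok]; ring
      · simp only [List.foldl_cons, Char.reduceEq, true_or, or_true, false_or, or_false,
          if_true, if_false]
        rw [(ih _ []).2]; simp [nsum, Itok]; ring
    · by_cases hm : c = '-'
      · subst hm
        constructor
        · simp only [List.foldl_cons, Char.reduceEq, true_or, or_true, false_or, or_false,
            if_true, if_false]
          rw [(ih _ []).2]; simp [pval, Itok]; ring
        · simp only [List.foldl_cons, Char.reduceEq, true_or, or_true, false_or, or_false,
            if_true, if_false]
          rw [(ih _ []).2]; simp [nsum, Itok]; ring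
      · constructor
        · simp only [List.foldl_cons, hp, hm, or_self, if_false]
          rw [(ih _ _).1]; simp [pval, hp, hm]
        · simp only [List.foldl_cons, hp, hm, or_self, if_false]
          rw [(ih _ _).2]; simp [nsum, hp, hm]

-- PySem.Chars.splitOn with a one-character separator is sp
theorem go_eq_sp (c : Char) (fuel : Nat) : ∀ (l cur : List Char) (done : List (List Char)),
    l.length ≤ fuel →
    PySem.Chars.splitOn.go [c] fuel l cur done
      = done.reverse ++ (cur.reverse ++ (sp c l).head!) :: (sp c l).tail := by
  induction fuel with
  | zero =>
    intro l cur done h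
    have hl : l = [] := List.length_eq_zero_iff.mp (Nat.le_zero.mp h)
    subst hl
    simp [PySem.Chars.splitOn.go, sp_nil]
  | succ fuel ih =>
    intro l cur done h
    cases l with
    | nil => simp [PySem.Chars.splitOn.go, sp_nil]
    | cons x xs =>
      by_cases hx : x = c
      · subst hx
        have hpre : List.isPrefixOf [x] (x :: xs) = true := by simp [List.isPrefixOf]
        rw [PySem.Chars.splitOn.go, if_pos hpre]
        have hdrop : List.drop (List.length [x]) (x :: xs) = xs := by simp
        rw [hdrop, ih xs [] (cur.reverse :: done) (by simpa using Nat.le_of_succ_le_succ h)]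
        simp [sp_nil, sp_cons_eq]
        rw [List.cons_head!_tail (sp_ne_nil x xs)]
      · have hpre : List.isPrefixOf [c] (x :: xs) = false := by
          have : ¬ c = x := fun e => hx e.symm
          simp [List.isPrefixOf, this]
        rw [PySem.Chars.splitOn.go, hpre]
        simp only [Bool.false_eq_true, if_false]
        rw [ih xs (x :: cur) done (by simpa using Nat.le_of_succ_le_succ h)]
        simp [sp_nil, sp_cons_eq, hx]

theorem splitOn_eq_sp (c : Char) (l : List Char) :
    PySem.Chars.splitOn l [c] = sp c l := by
  rw [PySem.Chars.splitOn, go_eq_sp c (l.length + 1) l [] [] (Nat.le_succ _)]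
  simp [← sp_cons]

theorem min_exp_eq_pval (a : String) : min_exp a = pval [] a.toList := by
  unfold min_exp
  simp only [splitOn_eq_sp]
  rw [PySem.List.foldl_append_singleton_eq_map
    (f := fun part => ((sp '+' part).map (fun t => (PySem.Int.ofChars? t).getD 0)).sum)]
  have hps : (fun part => ((sp '+' part).map (fun t => (PySem.Int.ofChars? t).getD 0)).sum)
      = psum := rfl
  rw [hps, List.nil_append, sp_cons '-' a.toList]
  have h1 := (pval_nsum_sp a.toList [] (by simp) (by simp)).1
  simp only [List.nil_append] at h1
  rw [h1]
  rw [sub_eq_add_neg, PySem.List.slice_from _ (by norm_num : (0:Int) ≤ 1)]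
  simp only [List.map_cons, Int.toNat_one, List.drop_succ_cons, List.drop_zero]
  have hget : (PySem.List.pyGet? (psum ((sp '-' a.toList).head!) ::
      List.map psum (sp '-' a.toList).tail) (0 : Int)).getD 0
      = psum ((sp '-' a.toList).head!) := by
    simp [pysem]
  rw [hget]
  have hsub : (fun (r s : Int) => r - s) = fun r s => r + (-s) := by
    funext r s; ring
  rw [hsub, PySem.List.foldl_add (g := fun s => -s)]
  rw [← List.sum_neg]

-- ===== VERDICT (by name: the statement is the Claim_ definition above) =====
theorem min_exp_spec : Claim_equal_min_exp := by
  intro a _ _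
  unfold Spec_min_exp min_exp_alt
  rw [min_exp_eq_pval]
  simp only []
  rw [(foldB_spec a.toList 0 []).1]
  ring
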